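-- pv_equiv track=rewrite | github.com/SebastianJHM/dev | Python/FlowShop/Recursos/cds.py | cds_sets
-- ===== SOURCE A (Python) =====
-- def cds_sets( TP ):
--     ## Obtener número de máquinas
--     num_maquinas = len(TP[0])
--
--     conjuntos = []
--     for k in range(1,num_maquinas):
--         conjunto = []
--         for x in TP:
--             aux = []
--
--             ## Primera suma
--             acum = 0
--             for i in range(0,k):
--                 acum += x[i]
--             #rof
--             aux.append(acum)
--
--             ## Segunda suma
--             acum = 0
--             for i in range(num_maquinas-k,num_maquinas):
--                 acum += x[i]
--             #rof
--             aux.append(acum)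
--             conjunto.append(aux)
--         #rod
--         conjuntos.append(conjunto)
--     #rof
--     return conjuntos
-- ===== SOURCE B (Python) =====
-- def cds_sets(TP):
--     num_maquinas = len(TP[0])
--     prefijos = []
--     for x in TP:
--         p = [0]
--         s = 0
--         for v in x[:num_maquinas]:
--             s += v
--             p.append(s)
--         prefijos.append(p)
--     return [[[p[k], p[num_maquinas] - p[num_maquinas - k]] for p in prefijos]
--             for k in range(1, num_maquinas)]
-- ===== Notes on version B (the rewrite author's own statement) =====
-- stated objective: faster
-- what changed: Replaces the per-(k,job) re-summation loops by one per-job prefix-sum pass, so each first-k/last-k value is an O(1) prefix-sum lookup.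
import Mathlib
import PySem

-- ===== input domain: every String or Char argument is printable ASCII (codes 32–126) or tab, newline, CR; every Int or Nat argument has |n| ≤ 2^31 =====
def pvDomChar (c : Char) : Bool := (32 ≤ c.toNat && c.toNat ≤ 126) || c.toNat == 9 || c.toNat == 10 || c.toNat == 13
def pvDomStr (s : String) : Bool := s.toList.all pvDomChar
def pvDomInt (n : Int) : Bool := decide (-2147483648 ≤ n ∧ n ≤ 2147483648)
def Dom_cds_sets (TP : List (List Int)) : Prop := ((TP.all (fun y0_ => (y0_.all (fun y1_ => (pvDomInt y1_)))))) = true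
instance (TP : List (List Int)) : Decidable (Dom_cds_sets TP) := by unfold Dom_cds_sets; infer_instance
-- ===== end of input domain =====

-- B replaces A's per-(k,job) re-summation loops by one prefix-sum pass per job,
-- each first-k / last-k value becoming an O(1) lookup (O(n*m) instead of O(n*m^2)).


-- ===== PORT A =====
-- x[i] / TP[0] are ported as pyGetD …; the default is only reachable where Python
-- raises IndexError, and Pre_cds_sets excludes exactly those inputs.
def cds_sets (TP : List (List Int)) : List (List (List Int)) :=
  let num_maquinas : Int := ((PySem.List.pyGetD TP 0 []).length : Int)
  (PySem.List.pyRange 1 num_maquinas).foldl (fun conjuntos k =>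
    conjuntos ++ [TP.foldl (fun conjunto x =>
      let acum1 := (PySem.List.pyRange 0 k).foldl
        (fun acum i => acum + PySem.List.pyGetD x i 0) 0
      let acum2 := (PySem.List.pyRange (num_maquinas - k) num_maquinas).foldl
        (fun acum i => acum + PySem.List.pyGetD x i 0) 0
      conjunto ++ [[acum1, acum2]]) []]) []

-- ===== PORT B =====
-- p = [0]; s = 0; for v in x[:m]: s += v; p.append(s)
def prefixSumsB (x : List Int) : List Int :=
  (x.foldl (fun (st : List Int × Int) v => (st.1 ++ [st.2 + v], st.2 + v)) ([0], 0)).1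

-- p[k] etc. are ported as pyGetD …; indices are in range under Pre_cds_sets,
-- exactly where Python's p[k] returns.
def cds_sets_alt (TP : List (List Int)) : List (List (List Int)) :=
  let num_maquinas : Int := ((PySem.List.pyGetD TP 0 []).length : Int)
  let prefijos := TP.map (fun x => prefixSumsB (PySem.List.slice x none (some num_maquinas)))
  (PySem.List.pyRange 1 num_maquinas).map (fun k =>
    prefijos.map (fun p =>
      [PySem.List.pyGetD p k 0,
       PySem.List.pyGetD p num_maquinas 0 - PySem.List.pyGetD p (num_maquinas - k) 0]))

-- ===== PRECONDITION & SPEC =====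
-- A raises IndexError on empty TP (TP[0]) and, when len(TP[0]) ≥ 2, on any row
-- shorter than the first row (x[i] for i < len(TP[0])); Pre_ excludes exactly those inputs.
def Pre_cds_sets (TP : List (List Int)) : Prop :=
  TP ≠ [] ∧ ((TP.headD []).length ≤ 1 ∨ ∀ x ∈ TP, (TP.headD []).length ≤ x.length)
instance (TP : List (List Int)) : Decidable (Pre_cds_sets TP) := by unfold Pre_cds_sets; infer_instance

def pvWitness_cds_sets : List (List Int) := [[1, 2, 3], [4, 5, 6]]

def Spec_cds_sets (TP : List (List Int)) (out : List (List (List Int))) : Prop := out = cds_sets_alt TP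
instance (TP : List (List Int)) (out : List (List (List Int))) : Decidable (Spec_cds_sets TP out) := by unfold Spec_cds_sets; infer_instance

-- ===== CLAIM (what is proved, stated in full; the proofs are below) =====
def Claim_equal_cds_sets : Prop := ∀ (TP : List (List Int)), Dom_cds_sets TP → Pre_cds_sets TP → Spec_cds_sets TP (cds_sets TP)

-- ===== LEMMAS AND PROOFS =====

-- pyGetD looks through take when the index is below the cut
lemma pyGetD_take (x : List Int) (n : Nat) {i : Int} (h0 : 0 ≤ i) (hi : i < (n : Int))
    (hn : (n : Int) ≤ (x.length : Int)) :
    PySem.List.pyGetD (x.take n) i 0 = PySem.List.pyGetD x i 0 := by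
  have hlen : (x.take n).length = n := by
    simp [List.length_take]; omega
  rw [PySem.List.pyGetD_eq_getElem (x.take n) 0 h0 (by rw [hlen]; omega),
      PySem.List.pyGetD_eq_getElem x 0 h0 (by omega)]
  exact List.getElem_take

-- A's inner summation loop over range(a, b) is the sum of the segment x[a:b]
lemma foldl_range_sum (x : List Int) (a b : Int) (ha : 0 ≤ a) (hab : a ≤ b)
    (hb : b ≤ (x.length : Int)) (c : Int) :
    (PySem.List.pyRange a b).foldl (fun acum i => acum + PySem.List.pyGetD x i 0) c
      = c + ((x.take b.toNat).drop a.toNat).sum := by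
  rw [PySem.List.foldl_add]
  congr 1
  have hlen : (((x.take b.toNat).length : Int)) = b := by
    simp [List.length_take]; omega
  have := PySem.List.map_pyGetD_pyRange (x.take b.toNat) 0 ha
  rw [PySem.List.len_eq, hlen] at this
  rw [← this]
  refine congrArg List.sum (List.map_congr_left ?_)
  intro i hi
  have ⟨h1, h2⟩ := PySem.List.mem_pyRange_one.mp hi
  exact (pyGetD_take x b.toNat (by omega) (by omega) (by omega)).symm

-- the fold of B's prefix-sum loop, with general accumulator
lemma prefixSumsB_foldl (y : List Int) : ∀ (l : List Int) (s : Int),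
    y.foldl (fun (st : List Int × Int) v => (st.1 ++ [st.2 + v], st.2 + v)) (l, s)
      = (l ++ (List.range y.length).map (fun n => s + (y.take (n+1)).sum), s + y.sum) := by
  induction y with
  | nil => intro l s; simp
  | cons v ys ih =>
    intro l s
    simp only [List.foldl_cons, ih (l ++ [s + v]) (s + v), List.length_cons,
      List.range_succ_eq_map, List.map_cons, List.map_map]
    simp only [Prod.mk.injEq]
    constructor
    · simp [Function.comp, List.take_succ_cons, add_assoc]
    · simp; ring

lemma prefixSumsB_eq (y : List Int) :
    prefixSumsB y = (List.range (y.length + 1)).map (fun n => (y.take n).sum) := by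
  unfold prefixSumsB
  rw [prefixSumsB_foldl y [0] 0]
  simp [List.range_succ_eq_map, List.map_map, Function.comp]

-- lookup in B's prefix-sum table
lemma pyGetD_prefixSumsB (y : List Int) {n : Int} (h0 : 0 ≤ n) (hn : n ≤ (y.length : Int)) :
    PySem.List.pyGetD (prefixSumsB y) n 0 = (y.take n.toNat).sum := by
  rw [prefixSumsB_eq]
  rw [PySem.List.pyGetD_eq_getElem _ 0 h0 (by simp; omega)]
  rw [List.getElem_map, List.getElem_range]

lemma sum_drop_take (x : List Int) (a b : Nat) :
    ((x.take b).drop a).sum = (x.take b).sum - ((x.take b).take a).sum := by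
  have := List.take_append_drop a (x.take b)
  have hs : ((x.take b).take a).sum + ((x.take b).drop a).sum = (x.take b).sum := by
    conv_rhs => rw [← this]
    rw [List.sum_append]
  omega

-- ===== VERDICT (by name: the statement is the Claim_ definition above) =====
theorem cds_sets_spec : Claim_equal_cds_sets := by
  intro TP _ hpre
  obtain ⟨hne, hcase⟩ := hpre
  have hhead : PySem.List.pyGetD TP 0 [] = TP.headD [] := by
    cases TP with
    | nil => exact absurd rfl hne
    | cons h t => rw [PySem.List.pyGetD_eq_getElem _ _ le_rfl (by simp)]; rfl
  unfold Spec_cds_sets cds_sets cds_sets_alt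
  simp only [PySem.List.foldl_append_singleton_eq_map, List.nil_append, List.map_map]
  rcases hcase with hsmall | hlen
  · have hnil : PySem.List.pyRange 1 ((PySem.List.pyGetD TP 0 []).length : Int) = [] := by
      apply PySem.List.pyRange_one_eq_nil
      rw [hhead]; exact_mod_cast hsmall
    rw [hnil]; rfl
  refine List.map_congr_left ?_
  intro k hk
  have ⟨hk1, hk2⟩ := PySem.List.mem_pyRange_one.mp hk
  refine List.map_congr_left ?_
  intro x hx
  have hrow : (((PySem.List.pyGetD TP 0 []).length : Int)) ≤ (x.length : Int) := by
    rw [hhead]; exact_mod_cast hlen x hx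
  set m : Int := ((PySem.List.pyGetD TP 0 []).length : Int) with hm
  have hm0 : 0 ≤ m := by positivity
  simp only [Function.comp]
  rw [PySem.List.slice_to x hm0]
  have hylen : ((x.take m.toNat).length : Int) = m := by
    simp [List.length_take]; omega
  rw [pyGetD_prefixSumsB _ (by omega) (by omega),
      pyGetD_prefixSumsB _ (by omega) (by omega),
      pyGetD_prefixSumsB _ (by omega) (by omega)]
  rw [foldl_range_sum x 0 k le_rfl (by omega) (by omega),
      foldl_range_sum x (m - k) m (by omega) (by omega) (by omega)]
  rw [sum_drop_take]
  have htt : ∀ (a : Int), 0 ≤ a → a ≤ m →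
      ((x.take m.toNat).take a.toNat) = x.take a.toNat := by
    intro a h0 hAm
    rw [List.take_take]
    congr 1
    omega
  rw [List.take_take, htt k (by omega) (by omega), htt (m - k) (by omega) (by omega)]
  simp only [sum_drop_take, List.take_take]
  have e1 : min (Int.toNat 0) k.toNat = 0 := by simp
  have e2 : min (m - k).toNat m.toNat = (m - k).toNat := by omega
  have e3 : min m.toNat m.toNat = m.toNat := by omega
  rw [e1, e2, e3]
  simp
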